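-- pv_equiv track=rewrite | github.com/merkauna/GachaBot | bot.py | squish_dupes
-- ===== SOURCE A (Python) =====
-- def squish_dupes(charlist):
--     newlist = []
--     for char in charlist:
--         num_of_dupes = charlist.count(char)
--         if num_of_dupes > 1:
--             char = "**(" + str(num_of_dupes) + ")** " + char
--             newlist.append(char)
--         else:
--             newlist.append(char)
--     newlist = sort_list_by_rarity(list(set(newlist)))
--     return newlist
--
-- def sort_list_by_rarity(charlist):
--     # Sorts a list of characters names by rarity then alphabetical
--     newlists = [[], [], [], [], [], []]
--     combined = []
--     for char in charlist:
--         if ":star::star::star::star::star::star:" in char: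
--             newlists[5].append(char)
--         elif ":star::star::star::star::star:" in char:
--             newlists[4].append(char)
--         elif ":star::star::star::star:" in char:
--             newlists[3].append(char)
--         elif ":star::star::star:" in char:
--             newlists[2].append(char)
--         elif ":star::star:" in char:
--             newlists[1].append(char)
--         elif ":star:" in char:
--             newlists[0].append(char)
--     for listitem in newlists[::-1]:
--         listitem.sort()
--         for char in listitem:
--             combined.append(char)
--     return combined
-- ===== SOURCE B (Python) =====
-- def _rarity(c):
--     # largest k in 6..1 with ':star:'*k occurring in c, else 0
--     k = 6
--     while k > 0 and (":star:" * k) not in c: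
--         k -= 1
--     return k
--
-- def squish_dupes(charlist):
--     counts = {}
--     for char in charlist:
--         counts[char] = counts.get(char, 0) + 1
--     annotated = set()
--     for char in charlist:
--         n = counts.get(char, 0)
--         annotated.add("**(" + str(n) + ")** " + char if n > 1 else char)
--     kept = [c for c in annotated if _rarity(c) > 0]
--     return sorted(kept, key=lambda c: str(6 - _rarity(c)) + c)
-- ===== Notes on version B (the rewrite author's own statement) =====
-- stated objective: faster
-- what changed: B replaces A's per-element charlist.count (quadratic) by a single counting-dict pass and replaces the six-bucket partition plus six separate sorts by one comparison sort with a decorate key (rarity digit prefixed to the name), dropping zero-star strings with a filter.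
import Mathlib
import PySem

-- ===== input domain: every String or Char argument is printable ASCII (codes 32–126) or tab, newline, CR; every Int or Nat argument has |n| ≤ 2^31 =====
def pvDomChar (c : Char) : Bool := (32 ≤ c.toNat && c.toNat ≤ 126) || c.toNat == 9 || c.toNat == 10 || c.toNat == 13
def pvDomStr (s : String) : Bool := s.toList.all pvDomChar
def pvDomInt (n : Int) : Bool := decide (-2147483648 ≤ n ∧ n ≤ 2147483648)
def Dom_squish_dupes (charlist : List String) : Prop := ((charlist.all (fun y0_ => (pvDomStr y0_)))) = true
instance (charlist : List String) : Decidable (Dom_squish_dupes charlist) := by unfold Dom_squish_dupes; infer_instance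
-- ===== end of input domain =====

-- B replaces A's per-element list.count and six-bucket partition sort by a one-pass counting
-- dict and a single decorate-key comparison sort; return value only (neither side mutates).

-- ===== PORT A =====
-- body of the bucket loop of sort_list_by_rarity (first matching condition wins)
def pvAStep (acc : List String × List String × List String × List String × List String × List String)
    (char : String) :
    List String × List String × List String × List String × List String × List String :=
  match acc with
  | (l0, l1, l2, l3, l4, l5) =>
    if PySem.Str.isIn ":star::star::star::star::star::star:" char then (l0, l1, l2, l3, l4, l5 ++ [char])
    else if PySem.Str.isIn ":star::star::star::star::star:" char then (l0, l1, l2, l3, l4 ++ [char], l5)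
    else if PySem.Str.isIn ":star::star::star::star:" char then (l0, l1, l2, l3 ++ [char], l4, l5)
    else if PySem.Str.isIn ":star::star::star:" char then (l0, l1, l2 ++ [char], l3, l4, l5)
    else if PySem.Str.isIn ":star::star:" char then (l0, l1 ++ [char], l2, l3, l4, l5)
    else if PySem.Str.isIn ":star:" char then (l0 ++ [char], l1, l2, l3, l4, l5)
    else (l0, l1, l2, l3, l4, l5)

def sort_list_by_rarity (charlist : List String) : List String :=
  match charlist.foldl pvAStep ([], [], [], [], [], []) with
  | (l0, l1, l2, l3, l4, l5) =>
    -- for listitem in newlists[::-1]: listitem.sort(); for char in listitem: combined.append(char)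
    [l5, l4, l3, l2, l1, l0].foldl
      (fun combined listitem => combined ++ PySem.List.sorted listitem (fun x => x) false) []

def squish_dupes (charlist : List String) : List String :=
  let newlist :=
    charlist.foldl
      (fun newlist char =>
        let num_of_dupes := PySem.List.count charlist char
        if num_of_dupes > 1 then
          newlist ++ ["**(" ++ PySem.Int.toStr (num_of_dupes : Int) ++ ")** " ++ char]
        else newlist ++ [char]) []
  sort_list_by_rarity (PySem.Set.ofList newlist)

-- ===== PORT B =====
-- ':star:' * k  (Python string repetition)
def pvStars (k : Nat) : String := String.ofList (PySem.List.pyRepeat ":star:".toList (k : Int))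

-- _rarity: 'k = 6; while k > 0 and (":star:" * k) not in c: k -= 1; return k'
def pvRarityLoop : Nat → String → Nat
  | 0, _ => 0
  | (k+1), c => if PySem.Str.isIn (pvStars (k+1)) c then k + 1 else pvRarityLoop k c

def pvRarity (c : String) : Nat := pvRarityLoop 6 c

-- the sort key str(6 - _rarity(c)) + c; Python compares strings by code points, which is
-- exactly the lexicographic order on the lists of characters (exact for every string)
def pvKey (c : String) : List Char := PySem.Int.toChars (6 - (pvRarity c : Int)) ++ c.toList

def squish_dupes_alt (charlist : List String) : List String :=
  let counts : PySem.Dict String Int :=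
    charlist.foldl (fun d char => d.insert char (d.getD char 0 + 1)) PySem.Dict.empty
  let annotated : PySem.Set String :=
    charlist.foldl
      (fun s char =>
        let n := counts.getD char 0
        s.add (if n > 1 then "**(" ++ PySem.Int.toStr n ++ ")** " ++ char else char))
      PySem.Set.empty
  let kept := annotated.filter (fun c => pvRarity c > 0)
  PySem.List.sorted kept pvKey false

-- ===== PRECONDITION & SPEC =====
def Spec_squish_dupes (charlist : List String) (out : List String) : Prop := out = squish_dupes_alt charlist
instance (charlist : List String) (out : List String) : Decidable (Spec_squish_dupes charlist out) := by unfold Spec_squish_dupes; infer_instance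

-- ===== CLAIM (what is proved, stated in full; the proofs are below) =====
def Claim_equal_squish_dupes : Prop := ∀ (charlist : List String), Dom_squish_dupes charlist → Spec_squish_dupes charlist (squish_dupes charlist)

-- ===== LEMMAS AND PROOFS =====

-- pvRarity as the literal six-way chain (each pvStars k evaluates to the literal string)
theorem pvRarity_unfold (c : String) : pvRarity c =
    (if PySem.Str.isIn ":star::star::star::star::star::star:" c then 6
     else if PySem.Str.isIn ":star::star::star::star::star:" c then 5
     else if PySem.Str.isIn ":star::star::star::star:" c then 4
     else if PySem.Str.isIn ":star::star::star:" c then 3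
     else if PySem.Str.isIn ":star::star:" c then 2
     else if PySem.Str.isIn ":star:" c then 1
     else 0) := rfl

theorem pvRarity_le (c : String) : pvRarity c ≤ 6 := by
  rw [pvRarity_unfold]; split_ifs <;> omega

-- 'the chain put c into bucket k' as a predicate
def pvR (k : Nat) (c : String) : Bool := pvRarity c == k

theorem pv_buckets (L : List String) :
    ∀ a0 a1 a2 a3 a4 a5 : List String,
      L.foldl pvAStep (a0, a1, a2, a3, a4, a5)
      = (a0 ++ L.filter (pvR 1), a1 ++ L.filter (pvR 2), a2 ++ L.filter (pvR 3),
         a3 ++ L.filter (pvR 4), a4 ++ L.filter (pvR 5), a5 ++ L.filter (pvR 6)) := by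
  induction L with
  | nil => simp
  | cons x t ih =>
    intro a0 a1 a2 a3 a4 a5
    simp only [List.foldl_cons]
    by_cases h6 : PySem.Str.isIn ":star::star::star::star::star::star:" x
    · have hr : pvRarity x = 6 := by rw [pvRarity_unfold, if_pos h6]
      simp only [pvAStep]
      rw [if_pos h6, ih]
      simp [pvR, hr]
    ·
      by_cases h5 : PySem.Str.isIn ":star::star::star::star::star:" x
      · have hr : pvRarity x = 5 := by rw [pvRarity_unfold, if_neg h6, if_pos h5]
        simp only [pvAStep]
        rw [if_neg h6, if_pos h5, ih]
        simp [pvR, hr]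
      ·
        by_cases h4 : PySem.Str.isIn ":star::star::star::star:" x
        · have hr : pvRarity x = 4 := by rw [pvRarity_unfold, if_neg h6, if_neg h5, if_pos h4]
          simp only [pvAStep]
          rw [if_neg h6, if_neg h5, if_pos h4, ih]
          simp [pvR, hr]
        ·
          by_cases h3 : PySem.Str.isIn ":star::star::star:" x
          · have hr : pvRarity x = 3 := by rw [pvRarity_unfold, if_neg h6, if_neg h5, if_neg h4, if_pos h3]
            simp only [pvAStep]
            rw [if_neg h6, if_neg h5, if_neg h4, if_pos h3, ih]
            simp [pvR, hr]
          ·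
            by_cases h2 : PySem.Str.isIn ":star::star:" x
            · have hr : pvRarity x = 2 := by rw [pvRarity_unfold, if_neg h6, if_neg h5, if_neg h4, if_neg h3, if_pos h2]
              simp only [pvAStep]
              rw [if_neg h6, if_neg h5, if_neg h4, if_neg h3, if_pos h2, ih]
              simp [pvR, hr]
            ·
              by_cases h1 : PySem.Str.isIn ":star:" x
              · have hr : pvRarity x = 1 := by rw [pvRarity_unfold, if_neg h6, if_neg h5, if_neg h4, if_neg h3, if_neg h2, if_pos h1]
                simp only [pvAStep]
                rw [if_neg h6, if_neg h5, if_neg h4, if_neg h3, if_neg h2, if_pos h1, ih]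
                simp [pvR, hr]
              · have hr : pvRarity x = 0 := by rw [pvRarity_unfold, if_neg h6, if_neg h5, if_neg h4, if_neg h3, if_neg h2, if_neg h1]
                simp only [pvAStep]
                rw [if_neg h6, if_neg h5, if_neg h4, if_neg h3, if_neg h2, if_neg h1, ih]
                simp [pvR, hr]


theorem pv_perm_filters (L : List String) :
    (L.filter (pvR 6) ++ L.filter (pvR 5) ++ L.filter (pvR 4) ++ L.filter (pvR 3)
      ++ L.filter (pvR 2) ++ L.filter (pvR 1)).Perm
    (L.filter (fun c => pvRarity c > 0)) := by
  induction L with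
  | nil => simp
  | cons x t ih =>
    have hle := pvRarity_le x
    simp only [List.filter_cons]
    interval_cases h : pvRarity x <;> simp only [pvR, h] <;> norm_num <;>
      (refine List.perm_iff_count.mpr (fun a => ?_)
       have hc := List.perm_iff_count.mp ih a
       simp [List.count_append, List.count_cons] at hc ⊢
       omega)

theorem pv_key_lt_of_rar_gt {a b : String} (h : pvRarity b < pvRarity a) : pvKey a < pvKey b := by
  have ha := pvRarity_le a
  have hb := pvRarity_le b
  unfold pvKey
  interval_cases hra : pvRarity a <;> interval_cases hrb : pvRarity b <;>
    first
    | omega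
    | exact List.cons_lt_cons_iff.mpr (Or.inl (by decide))

theorem pv_key_lt_of_eq_rar {a b : String} (h : pvRarity a = pvRarity b) (hab : a < b) :
    pvKey a < pvKey b := by
  unfold pvKey
  rw [h]
  exact List.append_left_lt (String.lt_iff_toList_lt.mp hab)

theorem pv_mem_block {L : List String} {k : Nat} {c : String}
    (hc : c ∈ PySem.List.sorted (L.filter (pvR k)) (fun x => x) false) : pvRarity c = k := by
  rw [PySem.List.mem_sorted, List.mem_filter] at hc
  have h2 := hc.2
  simp only [pvR, beq_iff_eq] at h2
  exact h2

theorem pv_block_pairwise (L : List String) (hnd : L.Nodup) (k : Nat) :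
    (PySem.List.sorted (L.filter (pvR k)) (fun x => x) false).Pairwise
      (fun a b => pvKey a < pvKey b) := by
  have hperm := PySem.List.sorted_perm (L.filter (pvR k)) (fun x => x) false
  have hnd' : (PySem.List.sorted (L.filter (pvR k)) (fun x => x) false).Nodup :=
    hperm.nodup_iff.mpr (hnd.filter _)
  have hle := PySem.List.sorted_pairwise (L.filter (pvR k)) (fun x => x)
  refine (hle.and hnd').imp_of_mem ?_
  intro a b ha hb hab
  exact pv_key_lt_of_eq_rar ((pv_mem_block ha).trans (pv_mem_block hb).symm)
    (lt_of_le_of_ne hab.1 hab.2)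

theorem pv_pairwise (L : List String) (hnd : L.Nodup) :
    ((PySem.List.sorted (L.filter (pvR 6)) (fun x => x) false
      ++ PySem.List.sorted (L.filter (pvR 5)) (fun x => x) false
      ++ PySem.List.sorted (L.filter (pvR 4)) (fun x => x) false
      ++ PySem.List.sorted (L.filter (pvR 3)) (fun x => x) false
      ++ PySem.List.sorted (L.filter (pvR 2)) (fun x => x) false
      ++ PySem.List.sorted (L.filter (pvR 1)) (fun x => x) false)).Pairwise
      (fun a b => pvKey a < pvKey b) := by
  simp only [List.pairwise_append, List.mem_append]
  refine ⟨⟨⟨⟨⟨pv_block_pairwise L hnd 6, pv_block_pairwise L hnd 5, ?_⟩,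
      pv_block_pairwise L hnd 4, ?_⟩, pv_block_pairwise L hnd 3, ?_⟩,
      pv_block_pairwise L hnd 2, ?_⟩, pv_block_pairwise L hnd 1, ?_⟩
  · intro a ha b hb
    exact pv_key_lt_of_rar_gt (by rw [pv_mem_block ha, pv_mem_block hb]; decide)
  · intro a ha b hb
    apply pv_key_lt_of_rar_gt
    rcases ha with ha | ha <;> rw [pv_mem_block ha, pv_mem_block hb] <;> decide
  · intro a ha b hb
    apply pv_key_lt_of_rar_gt
    rcases ha with (ha | ha) | ha <;> rw [pv_mem_block ha, pv_mem_block hb] <;> decide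
  · intro a ha b hb
    apply pv_key_lt_of_rar_gt
    rcases ha with ((ha | ha) | ha) | ha <;> rw [pv_mem_block ha, pv_mem_block hb] <;> decide
  · intro a ha b hb
    apply pv_key_lt_of_rar_gt
    rcases ha with (((ha | ha) | ha) | ha) | ha <;> rw [pv_mem_block ha, pv_mem_block hb] <;> decide

theorem pv_main (L : List String) (hnd : L.Nodup) :
    sort_list_by_rarity L
      = PySem.List.sorted (L.filter (fun c => pvRarity c > 0)) pvKey false := by
  unfold sort_list_by_rarity
  rw [pv_buckets]
  simp only [List.nil_append, List.foldl_cons, List.foldl_nil]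
  have hperm : ((PySem.List.sorted (L.filter (pvR 6)) (fun x => x) false
      ++ PySem.List.sorted (L.filter (pvR 5)) (fun x => x) false
      ++ PySem.List.sorted (L.filter (pvR 4)) (fun x => x) false
      ++ PySem.List.sorted (L.filter (pvR 3)) (fun x => x) false
      ++ PySem.List.sorted (L.filter (pvR 2)) (fun x => x) false
      ++ PySem.List.sorted (L.filter (pvR 1)) (fun x => x) false)).Perm
      (L.filter (fun c => pvRarity c > 0)) :=
    List.Perm.trans
      ((((((PySem.List.sorted_perm _ _ _).append (PySem.List.sorted_perm _ _ _)).append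
        (PySem.List.sorted_perm _ _ _)).append (PySem.List.sorted_perm _ _ _)).append
        (PySem.List.sorted_perm _ _ _)).append (PySem.List.sorted_perm _ _ _))
      (pv_perm_filters L)
  have h := PySem.List.sorted_eq_of_perm_of_pairwise_lt
      (L.filter (fun c => pvRarity c > 0)) _ pvKey hperm (pv_pairwise L hnd)
  convert h.symm using 2

-- the annotation both programs apply to each element
def pvAnnot (charlist : List String) (char : String) : String :=
  if PySem.List.count charlist char > 1 then
    "**(" ++ PySem.Int.toStr ((PySem.List.count charlist char : Nat) : Int) ++ ")** " ++ char
  else char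

theorem pvA_annot (charlist : List String) :
    charlist.foldl
      (fun newlist char =>
        let num_of_dupes := PySem.List.count charlist char
        if num_of_dupes > 1 then
          newlist ++ ["**(" ++ PySem.Int.toStr (num_of_dupes : Int) ++ ")** " ++ char]
        else newlist ++ [char]) []
      = charlist.map (pvAnnot charlist) := by
  have h : (fun (newlist : List String) (char : String) =>
        let num_of_dupes := PySem.List.count charlist char
        if num_of_dupes > 1 then
          newlist ++ ["**(" ++ PySem.Int.toStr (num_of_dupes : Int) ++ ")** " ++ char]
        else newlist ++ [char])
      = fun newlist char => newlist ++ [pvAnnot charlist char] := by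
    funext nl c
    simp only [pvAnnot]
    split_ifs <;> rfl
  rw [h, PySem.List.foldl_append_singleton_eq_map, List.nil_append]

theorem pvB_annot (charlist : List String) :
    (charlist.foldl
      (fun s char =>
        let n := (charlist.foldl (fun d char => d.insert char (d.getD char 0 + 1))
            PySem.Dict.empty).getD char 0
        s.add (if n > 1 then "**(" ++ PySem.Int.toStr n ++ ")** " ++ char else char))
      PySem.Set.empty)
      = PySem.Set.ofList (charlist.map (pvAnnot charlist)) := by
  have hc : ∀ char, (charlist.foldl (fun d char => d.insert char (d.getD char 0 + 1))
      PySem.Dict.empty).getD char 0 = ((PySem.List.count charlist char : Nat) : Int) := by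
    intro char
    rw [PySem.Dict.getD_foldl_insert_add_one]
    simp [PySem.List.count]
  have h : (fun (s : PySem.Set String) (char : String) =>
        let n := (charlist.foldl (fun d char => d.insert char (d.getD char 0 + 1))
            PySem.Dict.empty).getD char 0
        s.add (if n > 1 then "**(" ++ PySem.Int.toStr n ++ ")** " ++ char else char))
      = fun s char => s.add (pvAnnot charlist char) := by
    funext s c
    simp only [hc c, pvAnnot]
    have : (((PySem.List.count charlist c : Nat) : Int) > 1) ↔ PySem.List.count charlist c > 1 := by
      exact_mod_cast Iff.rfl
    split_ifs with h1 h2 h2 <;> first | rfl | (exact absurd (this.mp h1) h2) | (exact absurd (this.mpr h2) h1)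
  rw [h, PySem.Set.ofList_eq_foldl, List.foldl_map]
  rfl

-- ===== VERDICT (by name: the statement is the Claim_ definition above) =====
theorem squish_dupes_spec : Claim_equal_squish_dupes := by
  intro charlist _
  unfold Spec_squish_dupes squish_dupes squish_dupes_alt
  simp only [pvA_annot, pvB_annot]
  exact pv_main (PySem.Set.ofList (charlist.map (pvAnnot charlist)))
    (PySem.Set.nodup_ofList _)
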